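-- pv_equiv track=rewrite | github.com/dchiang23/Wordle-Solver | dcs229_hw2copy.py | spiltString
-- ===== SOURCE A (Python) =====
-- def spiltString(yellow: str)->dict[str, int]:
--     yCannotBe = {}
--     i = 0
--     while i<len(yellow):
--         key = yellow[i]
--         i+=1
--         values = []
--         while i<len(yellow) and yellow[i].isdigit():
--             values.append(int(yellow[i])-1)
--             i+=1
--         if values: yCannotBe[key] = values
--     return yCannotBe
-- ===== SOURCE B (Python) =====
-- def spiltString(yellow: str) -> dict[str, int]:
--     # Two staged passes, scanned right-to-left: digits accumulate into a pending run
--     # that flushes onto the key character to their left, producing a (key, values)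
--     # pair list; the dict is then built forwards from the reversed pair list.
--     if not yellow:
--         return {}
--     first, rest = yellow[0], yellow[1:]
--     pending = []
--     pairs = []
--     for c in reversed(rest):
--         if c.isdigit():
--             pending = [int(c) - 1] + pending
--         else:
--             if pending:
--                 pairs.append((c, pending))
--             pending = []
--     if pending:
--         pairs.append((first, pending))
--     d = {}
--     for k, v in reversed(pairs):
--         d[k] = v
--     return d
-- ===== Notes on version B (the rewrite author's own statement) =====
-- stated objective: alternative
-- what changed: Replaces A's interleaved index-walking nested while loops with two staged passes: a right-to-left scan over the characters that attaches each maximal digit run to the key character on its left, building a (key, values) pair list, then a forward dict-building pass over the reversed pair list.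
import Mathlib
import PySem

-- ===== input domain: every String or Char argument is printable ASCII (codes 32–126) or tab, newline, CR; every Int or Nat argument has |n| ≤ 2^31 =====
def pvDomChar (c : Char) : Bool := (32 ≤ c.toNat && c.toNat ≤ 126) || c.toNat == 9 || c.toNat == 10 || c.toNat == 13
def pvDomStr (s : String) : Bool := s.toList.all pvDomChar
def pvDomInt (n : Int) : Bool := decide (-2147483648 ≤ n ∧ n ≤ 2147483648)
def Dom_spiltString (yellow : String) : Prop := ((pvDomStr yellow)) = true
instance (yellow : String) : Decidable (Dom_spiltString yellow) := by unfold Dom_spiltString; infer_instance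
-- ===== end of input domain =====

-- B replaces A's interleaved index-walking nested while loops by two staged passes:
-- a right-to-left scan pairing each maximal digit run with the key to its left,
-- then a forward dict-building pass over the reversed pair list (objective: alternative).

-- int(c) for a character c the isdigit guard admitted (always `some` on the ASCII domain)
def pvDigit (c : Char) : Int := (PySem.Int.ofChars? [c]).getD 0

-- ===== PORT A =====
-- inner while: collect int(yellow[i])-1 while yellow[i].isdigit(), returning (values, new i)
def pvInnerA (s : List Char) (i : Nat) (values : List Int) : List Int × Nat :=
  if h : i < s.length then
    if PySem.Chars.isdigit s[i] then pvInnerA s (i + 1) (values ++ [pvDigit s[i] - 1])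
    else (values, i)
  else (values, i)
termination_by s.length - i

theorem pvInnerA_ge (s : List Char) (i : Nat) (v : List Int) : i ≤ (pvInnerA s i v).2 := by
  rw [pvInnerA]
  split
  · split
    · exact le_trans (Nat.le_succ i) (pvInnerA_ge s (i + 1) _)
    · exact le_refl i
  · exact le_refl i
termination_by s.length - i

-- outer while over i
def pvOuterA (s : List Char) (i : Nat) (d : PySem.Dict String (List Int)) :
    PySem.Dict String (List Int) :=
  if h : i < s.length then
    let key := (s[i]).toString
    let r := pvInnerA s (i + 1) []
    pvOuterA s r.2 (if r.1 = [] then d else d.insert key r.1)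
  else d
termination_by s.length - i
decreasing_by
  have := pvInnerA_ge s (i + 1) []
  omega

def spiltString (yellow : String) : List (String × List Int) :=
  (pvOuterA yellow.toList 0 PySem.Dict.empty).items

-- ===== PORT B =====
-- one right-to-left step: a digit is prepended to the pending run,
-- a non-digit key flushes the pending run onto the pair list
def pvStepB (st : List Int × List (String × List Int)) (c : Char) :
    List Int × List (String × List Int) :=
  if PySem.Chars.isdigit c then ((pvDigit c - 1) :: st.1, st.2)
  else ([], if st.1 = [] then st.2 else st.2 ++ [(c.toString, st.1)])

def spiltString_alt (yellow : String) : List (String × List Int) :=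
  match yellow.toList with
  | [] => []
  | first :: rest =>
    let st := rest.reverse.foldl pvStepB ([], [])
    let pairs := if st.1 = [] then st.2 else st.2 ++ [(first.toString, st.1)]
    ((pairs.reverse).foldl (fun d p => d.insert p.1 p.2)
      (PySem.Dict.empty : PySem.Dict String (List Int))).items

-- ===== PRECONDITION & SPEC =====
def Spec_spiltString (yellow : String) (out : List (String × List Int)) : Prop := out = spiltString_alt yellow
instance (yellow : String) (out : List (String × List Int)) : Decidable (Spec_spiltString yellow out) := by unfold Spec_spiltString; infer_instance

-- ===== CLAIM (what is proved, stated in full; the proofs are below) =====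
def Claim_equal_spiltString : Prop := ∀ (yellow : String), Dom_spiltString yellow → Spec_spiltString yellow (spiltString yellow)

-- ===== LEMMAS AND PROOFS =====

theorem pvDropWhile_eq_drop (p : Char → Bool) (l : List Char) :
    l.dropWhile p = l.drop (l.takeWhile p).length := by
  induction l with
  | nil => simp
  | cons c t ih =>
    by_cases h : p c
    · simp [h, ih]
    · simp [h]

theorem pvTakeWhile_len_le (p : Char → Bool) (l : List Char) :
    (l.takeWhile p).length ≤ l.length :=
  (List.takeWhile_prefix p).length_le

-- the left-to-right (key, nonempty values) pair sequence both programs fold into the dict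
def pvParse : List Char → List (String × List Int)
  | [] => []
  | c :: t =>
    if (t.takeWhile PySem.Chars.isdigit).map (fun d => pvDigit d - 1) = [] then
      pvParse (t.dropWhile PySem.Chars.isdigit)
    else (c.toString, (t.takeWhile PySem.Chars.isdigit).map (fun d => pvDigit d - 1)) ::
      pvParse (t.dropWhile PySem.Chars.isdigit)
termination_by l => l.length
decreasing_by
  all_goals
    have h1 : (t.dropWhile PySem.Chars.isdigit).length ≤ t.length := by
      rw [pvDropWhile_eq_drop]
      simp
    simp
    omega

theorem pvInnerA_eq (s : List Char) : ∀ (n i : Nat) (v : List Int), s.length - i ≤ n →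
    pvInnerA s i v = (v ++ ((s.drop i).takeWhile PySem.Chars.isdigit).map (fun d => pvDigit d - 1),
      i + ((s.drop i).takeWhile PySem.Chars.isdigit).length) := by
  intro n
  induction n with
  | zero =>
    intro i v hn
    have : s.length ≤ i := by omega
    rw [pvInnerA]
    simp [List.drop_eq_nil_of_le this, Nat.not_lt.mpr this]
  | succ m ih =>
    intro i v hn
    by_cases hi : i < s.length
    · have hdrop : s.drop i = s[i] :: s.drop (i + 1) := List.drop_eq_getElem_cons hi
      rw [pvInnerA, dif_pos hi]
      by_cases hdig : PySem.Chars.isdigit s[i]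
      · rw [if_pos hdig, ih (i + 1) (v ++ [pvDigit s[i] - 1]) (by omega), hdrop,
          List.takeWhile_cons_of_pos hdig]
        simp only [List.map_cons, List.length_cons, List.append_assoc, List.singleton_append,
          Prod.mk.injEq]
        exact ⟨by trivial, by omega⟩
      · rw [if_neg hdig, hdrop, List.takeWhile_cons_of_neg (by simp [hdig])]
        simp
    · rw [pvInnerA, dif_neg hi]
      simp [List.drop_eq_nil_of_le (Nat.not_lt.mp hi)]

theorem pvOuterA_eq (s : List Char) : ∀ (n i : Nat) (d : PySem.Dict String (List Int)),
    s.length - i ≤ n →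
    pvOuterA s i d = (pvParse (s.drop i)).foldl (fun d p => d.insert p.1 p.2) d := by
  intro n
  induction n with
  | zero =>
    intro i d hn
    have : s.length ≤ i := by omega
    rw [pvOuterA, dif_neg (Nat.not_lt.mpr this)]
    simp [List.drop_eq_nil_of_le this, pvParse]
  | succ m ih =>
    intro i d hn
    by_cases hi : i < s.length
    · have hdrop : s.drop i = s[i] :: s.drop (i + 1) := List.drop_eq_getElem_cons hi
      have hk := pvTakeWhile_len_le PySem.Chars.isdigit (s.drop (i + 1))
      simp only [List.length_drop] at hk
      rw [pvOuterA, dif_pos hi]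
      rw [pvInnerA_eq s (s.length - (i + 1)) (i + 1) [] (le_refl _)]
      simp only [List.nil_append]
      have hdw : (s.drop (i + 1)).dropWhile PySem.Chars.isdigit =
          s.drop (i + 1 + ((s.drop (i + 1)).takeWhile PySem.Chars.isdigit).length) := by
        rw [pvDropWhile_eq_drop, List.drop_drop]
      rw [hdrop, pvParse]
      by_cases hv : ((s.drop (i + 1)).takeWhile PySem.Chars.isdigit).map (fun d => pvDigit d - 1) = []
      · rw [if_pos hv,
          ih (i + 1 + ((s.drop (i + 1)).takeWhile PySem.Chars.isdigit).length) d (by omega), hdw,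
          if_pos hv]
      · rw [if_neg hv,
          ih (i + 1 + ((s.drop (i + 1)).takeWhile PySem.Chars.isdigit).length) _ (by omega), hdw,
          if_neg hv, List.foldl_cons]
    · rw [pvOuterA, dif_neg hi]
      simp [List.drop_eq_nil_of_le (Nat.not_lt.mp hi), pvParse]

theorem pvFoldB_eq (r : List Char) :
    r.reverse.foldl pvStepB ([], []) =
      ((r.takeWhile PySem.Chars.isdigit).map (fun d => pvDigit d - 1),
       (pvParse (r.dropWhile PySem.Chars.isdigit)).reverse) := by
  rw [List.foldl_reverse]
  induction r with
  | nil => simp [pvParse]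
  | cons c t ih =>
    rw [List.foldr_cons, ih]
    by_cases hdig : PySem.Chars.isdigit c
    · simp [pvStepB, hdig]
    · rw [List.takeWhile_cons_of_neg (by simp [hdig]), List.dropWhile_cons_of_neg (by simp [hdig]),
        pvParse]
      by_cases hv : (t.takeWhile PySem.Chars.isdigit).map (fun d => pvDigit d - 1) = []
      · simp [pvStepB, hdig, hv]
      · simp [pvStepB, hdig, hv]

-- ===== VERDICT (by name: the statement is the Claim_ definition above) =====
theorem spiltString_spec : Claim_equal_spiltString := by
  intro yellow _
  unfold Spec_spiltString spiltString spiltString_alt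
  rw [pvOuterA_eq yellow.toList yellow.toList.length 0 PySem.Dict.empty (by simp)]
  simp only [List.drop_zero]
  generalize yellow.toList = l
  cases l with
  | nil => simp only [pvParse, List.foldl_nil]; rfl
  | cons first rest =>
    dsimp only
    rw [pvFoldB_eq rest, pvParse]
    by_cases hv : (rest.takeWhile PySem.Chars.isdigit).map (fun d => pvDigit d - 1) = []
    · simp [hv]
    · simp [hv]
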